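-- pv_equiv track=rewrite | github.com/dotHTM/bilbOS-macropad | app/utils.py | rgb_to_int
-- ===== SOURCE A (Python) =====
-- def rgb_to_int(rgbTuple: tuple):
--     if 3 == len(rgbTuple):
--         acc = 0
--         for e in rgbTuple:
--             acc *= 256
--             acc += e
--         return acc
--     return 0x0
-- ===== SOURCE B (Python) =====
-- def rgb_to_int(rgbTuple: tuple):
--     if 3 == len(rgbTuple):
--         return rgbTuple[0] * 65536 + rgbTuple[1] * 256 + rgbTuple[2]
--     return 0x0
-- ===== Notes on version B (the rewrite author's own statement) =====
-- stated objective: idiomatic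
-- what changed: Replaced the accumulator loop over the tuple with the direct closed-form expression r*65536 + g*256 + b.
import Mathlib
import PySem

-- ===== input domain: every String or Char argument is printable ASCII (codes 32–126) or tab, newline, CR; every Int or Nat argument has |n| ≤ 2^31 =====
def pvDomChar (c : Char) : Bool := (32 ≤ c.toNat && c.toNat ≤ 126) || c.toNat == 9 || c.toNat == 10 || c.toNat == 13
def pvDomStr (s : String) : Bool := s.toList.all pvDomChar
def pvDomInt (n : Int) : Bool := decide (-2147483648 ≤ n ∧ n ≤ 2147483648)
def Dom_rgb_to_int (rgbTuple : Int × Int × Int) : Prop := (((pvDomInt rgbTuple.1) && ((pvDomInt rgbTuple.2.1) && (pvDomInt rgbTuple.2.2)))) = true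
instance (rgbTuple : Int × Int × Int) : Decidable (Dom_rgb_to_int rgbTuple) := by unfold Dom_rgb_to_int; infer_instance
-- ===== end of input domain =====

-- B replaces A's accumulator loop by the closed-form expression r*65536 + g*256 + b (idiomatic).

-- ===== PORT A =====
-- The parameter is a fixed triple, so Python's `3 == len(rgbTuple)` guard is always true;
-- the loop `acc *= 256; acc += e` over the three elements is a foldl over the element list.
def rgb_to_int (rgbTuple : Int × Int × Int) : Int :=
  [rgbTuple.1, rgbTuple.2.1, rgbTuple.2.2].foldl (fun acc e => acc * 256 + e) 0

-- ===== PORT B =====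
def rgb_to_int_alt (rgbTuple : Int × Int × Int) : Int :=
  rgbTuple.1 * 65536 + rgbTuple.2.1 * 256 + rgbTuple.2.2

-- ===== PRECONDITION & SPEC =====
def Spec_rgb_to_int (rgbTuple : Int × Int × Int) (out : Int) : Prop := out = rgb_to_int_alt rgbTuple
instance (rgbTuple : Int × Int × Int) (out : Int) : Decidable (Spec_rgb_to_int rgbTuple out) := by unfold Spec_rgb_to_int; infer_instance

-- ===== CLAIM (what is proved, stated in full; the proofs are below) =====
def Claim_equal_rgb_to_int : Prop := ∀ (rgbTuple : Int × Int × Int), Dom_rgb_to_int rgbTuple → Spec_rgb_to_int rgbTuple (rgb_to_int rgbTuple)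

-- ===== LEMMAS AND PROOFS =====

-- ===== VERDICT (by name: the statement is the Claim_ definition above) =====
theorem rgb_to_int_spec : Claim_equal_rgb_to_int := by
  intro ⟨r, g, b⟩ _
  show _ = _
  simp [rgb_to_int, rgb_to_int_alt, List.foldl]
  ring
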